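-- pv_equiv track=rewrite | github.com/bu119/Algorithm | 프로그래머스/2/340211. ［PCCP 기출문제］ 3번 ／ 충돌위험 찾기/［PCCP 기출문제］ 3번 ／ 충돌위험 찾기.py | save_shortest
-- ===== SOURCE A (Python) =====
-- def save_shortest(start, end):
--     sr, sc = start
--     er, ec = end
--     path = []
--     # 행 이동
--     if sr < er:
--         for i in range(1, er-sr+1):
--             path.append((sr+i, sc))
--     elif sr > er:
--         for i in range(1, sr-er+1):
--             path.append((sr-i, sc))
--     # 열 이동
--     if sc < ec:
--         for j in range(1, ec-sc+1):
--             path.append((er, sc+j))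
--     elif sc > ec:
--         for j in range(1, sc-ec+1):
--             path.append((er, sc-j))
--
--     return path
-- ===== SOURCE B (Python) =====
-- def save_shortest(start, end):
--     sr, sc = start
--     er, ec = end
--     dr = (er > sr) - (er < sr)
--     dc = (ec > sc) - (ec < sc)
--     r, c = sr, sc
--     path = []
--     for _ in range(abs(er - sr) + abs(ec - sc)):
--         if r != er:
--             r += dr
--         else:
--             c += dc
--         path.append((r, c))
--     return path
-- ===== Notes on version B (the rewrite author's own statement) =====
-- stated objective: alternative
-- what changed: Replaces A's four directional branches with two ranged segment loops by a single stateful walk: one loop of abs(er-sr)+abs(ec-sc) iterations moves a cursor one step at a time (row first until r reaches er, then column), appending each visited cell.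
import Mathlib
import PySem

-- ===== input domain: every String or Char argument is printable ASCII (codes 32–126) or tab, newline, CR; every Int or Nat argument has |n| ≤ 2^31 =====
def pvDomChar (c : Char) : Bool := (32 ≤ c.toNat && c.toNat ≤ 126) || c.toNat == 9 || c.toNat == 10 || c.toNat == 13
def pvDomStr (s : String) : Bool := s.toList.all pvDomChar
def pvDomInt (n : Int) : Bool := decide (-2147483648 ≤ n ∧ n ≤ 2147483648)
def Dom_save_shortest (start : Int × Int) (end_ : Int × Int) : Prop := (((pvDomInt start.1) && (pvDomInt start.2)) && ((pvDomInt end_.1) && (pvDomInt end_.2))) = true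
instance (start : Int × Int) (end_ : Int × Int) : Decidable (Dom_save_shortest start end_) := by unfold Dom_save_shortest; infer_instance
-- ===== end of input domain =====

-- B replaces A's four directional branches with two segment loops by a single stateful
-- one-cell-per-iteration walk (row first, then column); same cost, alternative decomposition.

-- ===== PORT A =====
def save_shortest (start : Int × Int) (end_ : Int × Int) : List (Int × Int) :=
  match start, end_ with
  | (sr, sc), (er, ec) =>
    let path : List (Int × Int) := []
    -- 행 이동 (row move)
    let path :=
      if sr < er then (PySem.List.pyRange 1 (er - sr + 1) 1).foldl (fun p i => p ++ [(sr + i, sc)]) path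
      else if sr > er then (PySem.List.pyRange 1 (sr - er + 1) 1).foldl (fun p i => p ++ [(sr - i, sc)]) path
      else path
    -- 열 이동 (column move)
    let path :=
      if sc < ec then (PySem.List.pyRange 1 (ec - sc + 1) 1).foldl (fun p j => p ++ [(er, sc + j)]) path
      else if sc > ec then (PySem.List.pyRange 1 (sc - ec + 1) 1).foldl (fun p j => p ++ [(er, sc - j)]) path
      else path
    path

-- ===== PORT B =====
-- (er > sr) - (er < sr) in Source B
def pvSign (x : Int) : Int := (if 0 < x then 1 else 0) - (if x < 0 then 1 else 0)

-- the single for-loop of Source B: fuel = remaining iterations, state = cursor (r, c)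
def pvWalk (er ec dr dc : Int) : Nat → Int → Int → List (Int × Int)
  | 0, _, _ => []
  | n + 1, r, c =>
    if r ≠ er then (r + dr, c) :: pvWalk er ec dr dc n (r + dr) c
    else (r, c + dc) :: pvWalk er ec dr dc n r (c + dc)

def save_shortest_alt (start : Int × Int) (end_ : Int × Int) : List (Int × Int) :=
  match start, end_ with
  | (sr, sc), (er, ec) =>
    let dr := pvSign (er - sr); let dc := pvSign (ec - sc)
    pvWalk er ec dr dc ((er - sr).natAbs + (ec - sc).natAbs) sr sc

-- ===== PRECONDITION & SPEC =====
def Spec_save_shortest (start : Int × Int) (end_ : Int × Int) (out : List (Int × Int)) : Prop := out = save_shortest_alt start end_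
instance (start : Int × Int) (end_ : Int × Int) (out : List (Int × Int)) : Decidable (Spec_save_shortest start end_ out) := by unfold Spec_save_shortest; infer_instance

-- ===== CLAIM (what is proved, stated in full; the proofs are below) =====
def Claim_equal_save_shortest : Prop := ∀ (start : Int × Int) (end_ : Int × Int), Dom_save_shortest start end_ → Spec_save_shortest start end_ (save_shortest start end_)

-- ===== LEMMAS AND PROOFS =====

-- canonical form both programs are reduced to
def rowSeg (sr er sc : Int) : List (Int × Int) :=
  (List.range (er - sr).natAbs).map (fun (i : Nat) => (sr + pvSign (er - sr) * ((i : Int) + 1), sc))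
def colSeg (er sc ec : Int) : List (Int × Int) :=
  (List.range (ec - sc).natAbs).map (fun (j : Nat) => (er, sc + pvSign (ec - sc) * ((j : Int) + 1)))

lemma foldl_append_map {α β : Type} (f : α → β) :
    ∀ (l : List α) (acc : List β), l.foldl (fun p x => p ++ [f x]) acc = acc ++ l.map f := by
  intro l
  induction l with
  | nil => simp
  | cons x xs ih => intro acc; simp [List.foldl, ih]

lemma pvWalk_col (er ec dr dc : Int) :
    ∀ (n : Nat) (c : Int),
      pvWalk er ec dr dc n er c = (List.range n).map (fun (j : Nat) => (er, c + dc * ((j : Int) + 1))) := by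
  intro n
  induction n with
  | zero => intro c; simp [pvWalk]
  | succ m ih =>
      intro c
      rw [List.range_succ_eq_map, List.map_cons, List.map_map]
      simp only [pvWalk, ih, ne_eq, not_true_eq_false, if_false]
      refine congrArg₂ List.cons ?_ ?_
      · simp
      · apply List.map_congr_left; intro k _; simp [Function.comp]; ring

lemma pvWalk_row (er ec dc dr : Int) (hdr : dr = 1 ∨ dr = -1) :
    ∀ (m : Nat) (n : Nat) (r c : Int), er = r + dr * m →
      pvWalk er ec dr dc (m + n) r c =
        (List.range m).map (fun (i : Nat) => (r + dr * ((i : Int) + 1), c)) ++ pvWalk er ec dr dc n er c := by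
  intro m
  induction m with
  | zero => intro n r c h; simp at h; simp [h]
  | succ m ih =>
      intro n r c h
      have hne : r ≠ er := by rcases hdr with h1 | h1 <;> subst h1 <;> push_cast at h <;> omega
      have hm : er = (r + dr) + dr * m := by push_cast at h ⊢; linarith [h]
      have hsplit : m + 1 + n = (m + n) + 1 := by omega
      rw [hsplit]
      simp only [pvWalk, hne, ne_eq, not_false_eq_true, if_true, ih (n := n) (r := r + dr) (c := c) hm]
      rw [List.range_succ_eq_map, List.map_cons, List.map_map, List.cons_append]
      refine congrArg₂ List.cons ?_ ?_
      · simp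
      · refine congrArg₂ HAppend.hAppend ?_ rfl
        apply List.map_congr_left; intro k _; simp [Function.comp]; ring

lemma alt_eq_canon (sr sc er ec : Int) :
    save_shortest_alt (sr, sc) (er, ec) = rowSeg sr er sc ++ colSeg er sc ec := by
  show pvWalk er ec (pvSign (er - sr)) (pvSign (ec - sc)) ((er - sr).natAbs + (ec - sc).natAbs) sr sc = _
  rcases lt_trichotomy sr er with h | h | h
  · have hs : pvSign (er - sr) = 1 := by simp [pvSign]; omega
    rw [hs, pvWalk_row er ec (pvSign (ec - sc)) 1 (Or.inl rfl) _ _ sr sc (by omega), pvWalk_col]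
    simp [rowSeg, colSeg, hs]
  · subst h
    have hs : pvSign (sr - sr) = 0 := by simp [pvSign]
    simp only [sub_self, Int.natAbs_zero, Nat.zero_add]
    rw [pvWalk_col]
    simp [rowSeg, colSeg]
  · have hs : pvSign (er - sr) = -1 := by simp [pvSign]; omega
    rw [hs, pvWalk_row er ec (pvSign (ec - sc)) (-1) (Or.inr rfl) _ _ sr sc (by omega), pvWalk_col]
    simp [rowSeg, colSeg, hs]

lemma rowA_eq (sr sc er : Int) :
    (if sr < er then (PySem.List.pyRange 1 (er - sr + 1) 1).foldl (fun p i => p ++ [(sr + i, sc)]) ([] : List (Int × Int))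
     else if sr > er then (PySem.List.pyRange 1 (sr - er + 1) 1).foldl (fun p i => p ++ [(sr - i, sc)]) []
     else []) = rowSeg sr er sc := by
  rcases lt_trichotomy sr er with h | h | h
  · rw [if_pos h, foldl_append_map, PySem.List.pyRange_one]
    have hs : pvSign (er - sr) = 1 := by simp [pvSign]; omega
    have hN : (er - sr + 1 - 1).toNat = (er - sr).natAbs := by omega
    simp only [rowSeg, hs, hN, List.map_map, List.nil_append]
    apply List.map_congr_left; intro k _; simp [Function.comp]; ring
  · subst h
    simp [rowSeg]
  · rw [if_neg (by omega), if_pos (by omega), foldl_append_map, PySem.List.pyRange_one]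
    have hs : pvSign (er - sr) = -1 := by simp [pvSign]; omega
    have hN : (sr - er + 1 - 1).toNat = (er - sr).natAbs := by omega
    simp only [rowSeg, hs, hN, List.map_map, List.nil_append]
    apply List.map_congr_left; intro k _; simp [Function.comp]; ring

lemma a_eq_canon (sr sc er ec : Int) :
    save_shortest (sr, sc) (er, ec) = rowSeg sr er sc ++ colSeg er sc ec := by
  show (if sc < ec then (PySem.List.pyRange 1 (ec - sc + 1) 1).foldl (fun p j => p ++ [(er, sc + j)])
          (if sr < er then (PySem.List.pyRange 1 (er - sr + 1) 1).foldl (fun p i => p ++ [(sr + i, sc)]) ([] : List (Int × Int))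
           else if sr > er then (PySem.List.pyRange 1 (sr - er + 1) 1).foldl (fun p i => p ++ [(sr - i, sc)]) []
           else [])
        else if sc > ec then (PySem.List.pyRange 1 (sc - ec + 1) 1).foldl (fun p j => p ++ [(er, sc - j)])
          (if sr < er then (PySem.List.pyRange 1 (er - sr + 1) 1).foldl (fun p i => p ++ [(sr + i, sc)]) ([] : List (Int × Int))
           else if sr > er then (PySem.List.pyRange 1 (sr - er + 1) 1).foldl (fun p i => p ++ [(sr - i, sc)]) []
           else [])
        else
          (if sr < er then (PySem.List.pyRange 1 (er - sr + 1) 1).foldl (fun p i => p ++ [(sr + i, sc)]) ([] : List (Int × Int))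
           else if sr > er then (PySem.List.pyRange 1 (sr - er + 1) 1).foldl (fun p i => p ++ [(sr - i, sc)]) []
           else [])) = rowSeg sr er sc ++ colSeg er sc ec
  rw [rowA_eq sr sc er]
  rcases lt_trichotomy sc ec with h | h | h
  · rw [if_pos h, foldl_append_map, PySem.List.pyRange_one]
    have hs : pvSign (ec - sc) = 1 := by simp [pvSign]; omega
    have hN : (ec - sc + 1 - 1).toNat = (ec - sc).natAbs := by omega
    simp only [colSeg, hs, hN, List.map_map]
    refine congrArg₂ HAppend.hAppend rfl ?_
    apply List.map_congr_left; intro k _; simp [Function.comp]; ring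
  · subst h; simp [colSeg]
  · rw [if_neg (by omega), if_pos (by omega), foldl_append_map, PySem.List.pyRange_one]
    have hs : pvSign (ec - sc) = -1 := by simp [pvSign]; omega
    have hN : (sc - ec + 1 - 1).toNat = (ec - sc).natAbs := by omega
    simp only [colSeg, hs, hN, List.map_map]
    refine congrArg₂ HAppend.hAppend rfl ?_
    apply List.map_congr_left; intro k _; simp [Function.comp]; ring

-- ===== VERDICT (by name: the statement is the Claim_ definition above) =====
theorem save_shortest_spec : Claim_equal_save_shortest := by
  intro start end_ _
  obtain ⟨sr, sc⟩ := start
  obtain ⟨er, ec⟩ := end_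
  show save_shortest (sr, sc) (er, ec) = save_shortest_alt (sr, sc) (er, ec)
  rw [a_eq_canon, alt_eq_canon]
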